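-- pv_equiv track=rewrite | github.com/Wasapon7763/cross_ai_gobang | user_ai/yota.py | threeinrow
-- ===== SOURCE A (Python) =====
-- def threeinrow(l):
--     ansa = [0,1,1,1,0,0]
--     ansb = [0,0,1,1,1,0]
--     length=len(l)
--     num=0
--     if(length>=6):
--         i=0
--         while(length-5>i):
--             if(ansa==l[i:i+6:1] or ansb==l[i:i+6:1]):
--                 num+=1
--                 i+=5
--             i+=1
--     return num
-- ===== SOURCE B (Python) =====
-- def threeinrow(l):
--     ansa = [0, 1, 1, 1, 0, 0]
--     ansb = [0, 0, 1, 1, 1, 0]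
--     # pass 1: every window start where one of the patterns occurs
--     positions = [i for i in range(len(l) - 5) if l[i:i+6] == ansa or l[i:i+6] == ansb]
--     # pass 2: greedy non-overlap count over the match positions
--     num = 0
--     last_end = 0
--     for p in positions:
--         if p >= last_end:
--             num += 1
--             last_end = p + 6
--     return num
-- ===== Notes on version B (the rewrite author's own statement) =====
-- stated objective: alternative
-- what changed: Replaces the single index-jumping while loop by two passes: first collect all pattern-match window starts, then a greedy fold over those positions maintaining last_end to count non-overlapping matches.
import Mathlib
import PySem

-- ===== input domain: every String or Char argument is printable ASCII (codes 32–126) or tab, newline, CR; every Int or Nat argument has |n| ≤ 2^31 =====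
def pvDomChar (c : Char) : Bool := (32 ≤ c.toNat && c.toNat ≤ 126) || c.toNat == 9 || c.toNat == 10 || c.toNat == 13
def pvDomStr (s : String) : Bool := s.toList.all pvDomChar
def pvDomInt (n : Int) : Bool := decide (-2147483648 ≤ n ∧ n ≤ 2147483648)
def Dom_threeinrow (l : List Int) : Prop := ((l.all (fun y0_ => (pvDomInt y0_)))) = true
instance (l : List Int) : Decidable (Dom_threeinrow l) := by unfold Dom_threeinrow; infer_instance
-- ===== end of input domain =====

-- B replaces A's single index-jumping while loop by two passes (collect match positions, then
-- a greedy non-overlap fold); objective: alternative decomposition, same cost.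

-- ===== PORT A =====
def pvAnsa : List Int := [0, 1, 1, 1, 0, 0]
def pvAnsb : List Int := [0, 0, 1, 1, 1, 0]

-- 'ansa == l[i:i+6:1] or ansb == l[i:i+6:1]' (step-1 slice = plain slice)
def pvMatch (l : List Int) (i : Int) : Bool :=
  pvAnsa == PySem.List.slice l (some i) (some (i + 6)) ||
  pvAnsb == PySem.List.slice l (some i) (some (i + 6))

-- A's while loop; fuel bounds the iteration count (each step i strictly increases)
def threeinrowLoop (l : List Int) (len : Int) : Nat → Int → Int → Int
  | 0, _, num => num
  | fuel + 1, i, num =>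
    if len - 5 > i then
      if pvMatch l i then threeinrowLoop l len fuel (i + 6) (num + 1)
      else threeinrowLoop l len fuel (i + 1) num
    else num

def threeinrow (l : List Int) : Int :=
  let length : Int := l.length
  if length ≥ 6 then threeinrowLoop l length l.length 0 0 else 0

-- ===== PORT B =====
-- 'if p >= last_end: num += 1; last_end = p + 6' on state (num, last_end)
def pvStep (s : Int × Int) (p : Int) : Int × Int :=
  if p ≥ s.2 then (s.1 + 1, p + 6) else s

def threeinrow_alt (l : List Int) : Int :=
  let positions := (PySem.List.pyRange 0 ((l.length : Int) - 5) 1).filter (pvMatch l)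
  (positions.foldl pvStep ((0 : Int), (0 : Int))).1

-- ===== PRECONDITION & SPEC =====
def Spec_threeinrow (l : List Int) (out : Int) : Prop := out = threeinrow_alt l
instance (l : List Int) (out : Int) : Decidable (Spec_threeinrow l out) := by unfold Spec_threeinrow; infer_instance

-- ===== CLAIM (what is proved, stated in full; the proofs are below) =====
def Claim_equal_threeinrow : Prop := ∀ (l : List Int), Dom_threeinrow l → Spec_threeinrow l (threeinrow l)

-- ===== LEMMAS AND PROOFS =====

-- proof-side generalization of B's position list: match positions starting at index i
def pvP (l : List Int) (i : Int) : List Int :=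
  (PySem.List.pyRange i ((l.length : Int) - 5) 1).filter (pvMatch l)

theorem pvP_nil (l : List Int) (i : Int) (h : (l.length : Int) - 5 ≤ i) : pvP l i = [] := by
  unfold pvP
  rw [PySem.List.pyRange_one_eq_nil h]
  rfl

theorem pvP_cons (l : List Int) (i : Int) (h : i < (l.length : Int) - 5) :
    pvP l i = if pvMatch l i then i :: pvP l (i + 1) else pvP l (i + 1) := by
  unfold pvP
  rw [PySem.List.pyRange_one_cons h, List.filter_cons]

-- skipping: elements of pvP below the current last_end leave the fold state unchanged
theorem pvSkip (l : List Int) : ∀ (n : Nat) (j e num : Int), j ≤ e → (e - j).toNat ≤ n →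
    (pvP l j).foldl pvStep (num, e) = (pvP l e).foldl pvStep (num, e) := by
  intro n
  induction n with
  | zero =>
    intro j e num hje hn
    have : j = e := by omega
    rw [this]
  | succ n ih =>
    intro j e num hje hn
    by_cases hjeq : j = e
    · rw [hjeq]
    · have hjlt : j < e := lt_of_le_of_ne hje hjeq
      by_cases hlen : j < (l.length : Int) - 5
      · rw [pvP_cons l j hlen]
        split
        · have hstep : pvStep (num, e) j = (num, e) := by
            unfold pvStep; simp only
            rw [if_neg (by omega)]
          rw [List.foldl_cons, hstep]
          exact ih (j + 1) e num (by omega) (by omega)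
        · exact ih (j + 1) e num (by omega) (by omega)
      · rw [pvP_nil l j (by omega), pvP_nil l e (by omega)]

-- A's loop from index i equals B's fold over the remaining match positions
theorem pvMain (l : List Int) : ∀ (fuel : Nat) (i num e : Int), e ≤ i →
    ((l.length : Int) - 5 - i).toNat ≤ fuel →
    threeinrowLoop l (l.length : Int) fuel i num = ((pvP l i).foldl pvStep (num, e)).1 := by
  intro fuel
  induction fuel with
  | zero =>
    intro i num e hei hf
    rw [pvP_nil l i (by omega)]
    rfl
  | succ fuel ih =>
    intro i num e hei hf
    by_cases hlt : (l.length : Int) - 5 > i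
    · rw [threeinrowLoop, if_pos hlt]
      by_cases hm : pvMatch l i
      · rw [if_pos hm, pvP_cons l i hlt, if_pos hm, List.foldl_cons]
        have hstep : pvStep (num, e) i = (num + 1, i + 6) := by
          unfold pvStep; simp only
          rw [if_pos (by omega)]
        rw [hstep, pvSkip l 5 (i + 1) (i + 6) (num + 1) (by omega) (by omega)]
        exact ih (i + 6) (num + 1) (i + 6) le_rfl (by omega)
      · rw [if_neg hm, pvP_cons l i hlt, if_neg hm]
        exact ih (i + 1) num e (by omega) (by omega)
    · rw [threeinrowLoop, if_neg hlt, pvP_nil l i (by omega)]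
      rfl

-- ===== VERDICT (by name: the statement is the Claim_ definition above) =====
theorem threeinrow_spec : Claim_equal_threeinrow := by
  intro l _
  unfold Spec_threeinrow threeinrow threeinrow_alt
  simp only
  by_cases h6 : (l.length : Int) ≥ 6
  · rw [if_pos h6]
    exact pvMain l l.length 0 0 0 le_rfl (by omega)
  · rw [if_neg h6]
    have : pvP l 0 = [] := pvP_nil l 0 (by omega)
    unfold pvP at this
    rw [this]
    rfl
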